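-- pv_equiv track=rewrite | github.com/Chand7577/mooc | part05/part05-05_sudoku_column/src/sudoku_column.py | check_freq
-- ===== SOURCE A (Python) =====
-- def check_freq(col):
--     freq={}
--
--     for value in set(col):
--         occurence=col.count(value)
--         freq[value]=occurence
--
--
--     for value in freq:
--         if value==0:
--             continue
--
--         if freq[value]>1:
--             return False
--
--     return True
-- ===== SOURCE B (Python) =====
-- def check_freq(col):
--     vals = [v for v in col if v != 0]
--     return len(vals) == len(set(vals))
-- ===== Notes on version B (the rewrite author's own statement) =====
-- stated objective: simpler
-- what changed: Replaces A's count-dictionary build plus a branching scan over its keys with a single comprehension filtering zeros and one set-cardinality uniqueness test.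
import Mathlib
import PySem

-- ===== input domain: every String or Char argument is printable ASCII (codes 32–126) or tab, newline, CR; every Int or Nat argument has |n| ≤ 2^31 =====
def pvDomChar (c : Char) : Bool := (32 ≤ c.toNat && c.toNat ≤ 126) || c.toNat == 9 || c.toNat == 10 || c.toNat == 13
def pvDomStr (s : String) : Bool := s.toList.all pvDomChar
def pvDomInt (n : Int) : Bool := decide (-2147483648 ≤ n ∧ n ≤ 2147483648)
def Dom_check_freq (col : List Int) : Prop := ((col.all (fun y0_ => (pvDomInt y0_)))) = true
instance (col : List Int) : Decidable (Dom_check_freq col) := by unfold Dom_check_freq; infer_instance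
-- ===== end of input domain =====

-- B replaces A's count-dictionary build plus key-scan with one zero-filtering pass and a set-cardinality uniqueness test (simpler).


-- ===== PORT A =====
-- 'for value in freq: …' with the two branches in order; freq[value] is getD (the key is always present)
def checkFreqLoop (freq : PySem.Dict Int Int) : List Int → Bool
  | [] => true
  | value :: rest =>
    if value == 0 then checkFreqLoop freq rest
    else if freq.getD value 0 > 1 then false
    else checkFreqLoop freq rest

def check_freq (col : List Int) : Bool :=
  -- freq = {}; for value in set(col): freq[value] = col.count(value)
  let freq : PySem.Dict Int Int :=
    (PySem.Set.ofList col).foldl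
      (fun d value => d.insert value ((PySem.List.count col value : Int))) PySem.Dict.empty
  checkFreqLoop freq freq.keys

-- ===== PORT B =====
def check_freq_alt (col : List Int) : Bool :=
  let vals := col.filter (fun v => v != 0)
  vals.length == (PySem.Set.ofList vals).length

-- ===== PRECONDITION & SPEC =====
def Spec_check_freq (col : List Int) (out : Bool) : Prop := out = check_freq_alt col
instance (col : List Int) (out : Bool) : Decidable (Spec_check_freq col out) := by unfold Spec_check_freq; infer_instance

-- ===== CLAIM (what is proved, stated in full; the proofs are below) =====
def Claim_equal_check_freq : Prop := ∀ (col : List Int), Dom_check_freq col → Spec_check_freq col (check_freq col)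

-- ===== LEMMAS AND PROOFS =====

-- A's inner loop returns true iff no nonzero key has count > 1
theorem checkFreqLoop_eq_true_iff (freq : PySem.Dict Int Int) (l : List Int) :
    checkFreqLoop freq l = true ↔ ∀ v ∈ l, v ≠ 0 → freq.getD v 0 ≤ 1 := by
  induction l with
  | nil => simp [checkFreqLoop]
  | cons x xs ih =>
    by_cases hx : x = 0
    · subst hx; simp [checkFreqLoop, ih]
    · by_cases hc : freq.getD x 0 > 1
      · have h1 : ¬ freq.getD x 0 ≤ 1 := by omega
        simp [checkFreqLoop, hx, hc, h1]
      · have h1 : freq.getD x 0 ≤ 1 := by omega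
        simp [checkFreqLoop, hx, hc, ih, h1]

-- the dict A builds maps each distinct value of col to its count
theorem getD_freq (col : List Int) (v : Int) (hv : v ∈ PySem.Set.ofList col) :
    ((PySem.Set.ofList col).foldl
      (fun d value => d.insert value ((PySem.List.count col value : Int))) PySem.Dict.empty).getD v 0
      = (PySem.List.count col v : Int) := by
  have hitems := PySem.Dict.items_foldl_insert_fresh (PySem.Set.ofList col) (fun x => x)
      (fun x => (PySem.List.count col x : Int)) PySem.Dict.empty
      (by intro a _; simp [PySem.Dict.contains_empty])
      (by simp)
  apply PySem.Dict.getD_of_mem_items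
  · rw [hitems]; simp
    exact Or.inr (by simpa [PySem.Set.mem_ofList] using hv)
  · exact PySem.Dict.nodup_keys_foldl_insert _ _ _ (by simp)

theorem keys_freq (col : List Int) :
    ((PySem.Set.ofList col).foldl
      (fun d value => d.insert value ((PySem.List.count col value : Int))) PySem.Dict.empty).keys
      = PySem.Set.ofList (PySem.Set.ofList col) := by
  rw [PySem.Dict.keys_foldl_insert]
  simp [PySem.Dict.keys_empty, PySem.Set.update_nil_left]

-- set(xs) is a sublist of xs (first occurrences, in order)
theorem ofList_sublist (xs : List Int) : (PySem.Set.ofList xs).Sublist xs := by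
  induction xs with
  | nil => simp [PySem.Set.ofList_nil]
  | cons x xs ih =>
    rw [PySem.Set.ofList_cons]
    have h1 : ((PySem.Set.ofList xs).discard x).Sublist (PySem.Set.ofList xs) := by
      unfold PySem.Set.discard; exact List.filter_sublist
    exact List.Sublist.cons₂ x (h1.trans ih)

-- len(set(xs)) == len(xs) iff xs has no duplicates
theorem len_ofList_eq_iff (xs : List Int) :
    xs.length = (PySem.Set.ofList xs).length ↔ xs.Nodup := by
  constructor
  · intro h
    have := (ofList_sublist xs).eq_of_length h.symm
    rw [← this]; exact PySem.Set.nodup_ofList xs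
  · intro h; rw [PySem.Set.ofList_eq_self_of_nodup xs h]

theorem check_freq_eq_alt (col : List Int) : check_freq col = check_freq_alt col := by
  simp only [check_freq, check_freq_alt]
  rw [Bool.eq_iff_iff]
  rw [checkFreqLoop_eq_true_iff, keys_freq, beq_iff_eq, len_ofList_eq_iff,
      List.nodup_iff_count_le_one]
  constructor
  · intro h a
    by_cases ha : a = 0
    · subst ha
      have : List.count (0 : Int) (List.filter (fun v => v != 0) col) = 0 := by
        simp [List.count_eq_zero, List.mem_filter]
      omega
    · rw [List.count_filter (by simp [ha])]
      by_cases hmem : a ∈ col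
      · have := h a (by simp [PySem.Set.mem_ofList, hmem]) ha
        rw [getD_freq col a (by simp [PySem.Set.mem_ofList, hmem])] at this
        simp only [PySem.List.count_eq] at this
        exact_mod_cast this
      · simp [List.count_eq_zero_of_not_mem hmem]
  · intro h v hv hv0
    have hvmem : v ∈ PySem.Set.ofList col := by
      simpa [PySem.Set.mem_ofList] using hv
    rw [getD_freq col v hvmem]
    have := h v
    rw [List.count_filter (by simp [hv0])] at this
    simp only [PySem.List.count_eq]
    exact_mod_cast this

-- ===== VERDICT (by name: the statement is the Claim_ definition above) =====
theorem check_freq_spec : Claim_equal_check_freq := by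
  intro col _
  unfold Spec_check_freq
  exact check_freq_eq_alt col
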